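-- pv_equiv track=rewrite | github.com/Juan-sanchez-reulet/peakflow | scripts/coverage_report.py | build_coverage_matrix
-- ===== SOURCE A (Python) =====
-- MANEUVERS = ["bottom_turn", "cutback", "top_turn"]
--
-- STANCES = ["regular", "goofy"]
--
-- DIRECTIONS = ["frontside", "backside"]
--
-- def build_coverage_matrix(clips: list) -> dict:
--     """Build a 3D coverage matrix: maneuver -> stance -> direction -> count."""
--     matrix = {}
--     for m in MANEUVERS:
--         matrix[m] = {}
--         for s in STANCES:
--             matrix[m][s] = {}
--             for d in DIRECTIONS:
--                 matrix[m][s][d] = []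
--
--     for clip in clips:
--         m = clip.get("maneuver", "")
--         s = clip.get("stance", "")
--         d = clip.get("direction", "")
--         if m in matrix and s in matrix.get(m, {}) and d in matrix.get(m, {}).get(s, {}):
--             matrix[m][s][d].append(clip)
--
--     return matrix
-- ===== SOURCE B (Python) =====
-- MANEUVERS = ["bottom_turn", "cutback", "top_turn"]
--
-- STANCES = ["regular", "goofy"]
--
-- DIRECTIONS = ["frontside", "backside"]
--
-- def build_coverage_matrix(clips: list) -> dict:
--     """Per-cell selection: for each fixed (maneuver, stance, direction) cell,
--     filter the clip list directly; no mutable matrix, no grouping dict."""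
--     return {m: {s: {d: [c for c in clips
--                         if c.get("maneuver", "") == m
--                         and c.get("stance", "") == s
--                         and c.get("direction", "") == d]
--                     for d in DIRECTIONS}
--                 for s in STANCES}
--             for m in MANEUVERS}
-- ===== Notes on version B (the rewrite author's own statement) =====
-- stated objective: simpler
-- what changed: B replaces A's mutable init-then-dispatch pass (build nested dict, route each clip into its cell, dropping invalid keys) by a direct per-cell construction: for each of the 12 fixed (maneuver, stance, direction) cells it filters the clips list, so there is no mutation, no pre-initialisation and no membership test against the matrix.
import Mathlib
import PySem

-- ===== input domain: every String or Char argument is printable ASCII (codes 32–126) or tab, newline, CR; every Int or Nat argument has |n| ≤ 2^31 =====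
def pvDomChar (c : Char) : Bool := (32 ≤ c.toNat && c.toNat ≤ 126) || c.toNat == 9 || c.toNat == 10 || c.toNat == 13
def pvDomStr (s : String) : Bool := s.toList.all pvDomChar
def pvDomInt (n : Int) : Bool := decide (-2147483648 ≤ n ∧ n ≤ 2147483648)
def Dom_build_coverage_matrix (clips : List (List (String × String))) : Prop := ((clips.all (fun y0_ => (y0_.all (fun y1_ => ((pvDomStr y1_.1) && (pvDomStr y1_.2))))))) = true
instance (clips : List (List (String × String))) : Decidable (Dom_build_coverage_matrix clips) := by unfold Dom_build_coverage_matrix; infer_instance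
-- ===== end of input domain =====

-- B builds each of the 12 fixed cells directly by filtering the clip list,
-- instead of A's mutable init-then-dispatch pass (no speed claim).

-- ===== PORT A =====
def pvMANEUVERS : List String := ["bottom_turn", "cutback", "top_turn"]
def pvSTANCES : List String := ["regular", "goofy"]
def pvDIRECTIONS : List String := ["frontside", "backside"]

def build_coverage_matrix (clips : List (List (String × String))) : List (String × List (String × List (String × List (List (String × String))))) :=
  (clips.foldl (fun mx clip =>
    let m := (PySem.Dict.mk clip).getD "maneuver" ""
    let s := (PySem.Dict.mk clip).getD "stance" ""
    let d := (PySem.Dict.mk clip).getD "direction" ""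
    if mx.contains m && (mx.getD m PySem.Dict.empty).contains s &&
       ((mx.getD m PySem.Dict.empty).getD s PySem.Dict.empty).contains d then
      mx.modify m PySem.Dict.empty (fun sm =>
        sm.modify s PySem.Dict.empty (fun dm => dm.modify d [] (· ++ [clip])))
    else mx)
    (pvMANEUVERS.foldl (fun mx m =>
      let mx := mx.insert m PySem.Dict.empty
      pvSTANCES.foldl (fun mx s =>
        let mx := mx.modify m PySem.Dict.empty (fun sm => sm.insert s PySem.Dict.empty)
        pvDIRECTIONS.foldl (fun mx d =>
          mx.modify m PySem.Dict.empty (fun sm =>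
            sm.modify s PySem.Dict.empty (fun dm => dm.insert d []))) mx) mx)
      (PySem.Dict.empty : PySem.Dict String (PySem.Dict String (PySem.Dict String (List (List (String × String)))))))).items.map
    (fun p => (p.1, p.2.items.map (fun q => (q.1, q.2.items))))

-- ===== PORT B =====
def build_coverage_matrix_alt (clips : List (List (String × String))) : List (String × List (String × List (String × List (List (String × String))))) :=
  pvMANEUVERS.map (fun m =>
    (m, pvSTANCES.map (fun s =>
      (s, pvDIRECTIONS.map (fun d =>
        (d, clips.filter (fun c =>
          (PySem.Dict.mk c).getD "maneuver" "" == m &&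
          (PySem.Dict.mk c).getD "stance" "" == s &&
          (PySem.Dict.mk c).getD "direction" "" == d)))))))

-- ===== PRECONDITION & SPEC =====
-- decidable-equality helpers (instance search alone does not reach this nesting depth)
def pvDE1 : DecidableEq (List (List (String × String))) := inferInstance
def pvDE2 : DecidableEq (List (String × List (List (String × String)))) :=
  @instDecidableEqList _ (@instDecidableEqProd _ _ _ pvDE1)
def pvDE3 : DecidableEq (List (String × List (String × List (List (String × String))))) :=
  @instDecidableEqList _ (@instDecidableEqProd _ _ _ pvDE2)
def pvDE4 : DecidableEq (List (String × List (String × List (String × List (List (String × String)))))) :=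
  @instDecidableEqList _ (@instDecidableEqProd _ _ _ pvDE3)
def Spec_build_coverage_matrix (clips : List (List (String × String))) (out : List (String × List (String × List (String × List (List (String × String)))))) : Prop := out = build_coverage_matrix_alt clips
instance (clips : List (List (String × String))) (out : List (String × List (String × List (String × List (List (String × String)))))) : Decidable (Spec_build_coverage_matrix clips out) := by unfold Spec_build_coverage_matrix; exact pvDE4 _ _

-- ===== CLAIM (what is proved, stated in full; the proofs are below) =====
def Claim_equal_build_coverage_matrix : Prop := ∀ (clips : List (List (String × String))), Dom_build_coverage_matrix clips → Spec_build_coverage_matrix clips (build_coverage_matrix clips)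

-- ===== LEMMAS AND PROOFS =====

-- A's detected key of a clip.
def pvKey (clip : List (String × String)) : String × String × String :=
  ((PySem.Dict.mk clip).getD "maneuver" "",
   (PySem.Dict.mk clip).getD "stance" "",
   (PySem.Dict.mk clip).getD "direction" "")

-- The nested matrix whose cell (m, s, d) holds f (m, s, d).
def pvM (f : String × String × String → List (List (String × String))) :
    PySem.Dict String (PySem.Dict String (PySem.Dict String (List (List (String × String))))) :=
  PySem.Dict.mk (pvMANEUVERS.map (fun m =>
    (m, PySem.Dict.mk (pvSTANCES.map (fun s =>
      (s, PySem.Dict.mk (pvDIRECTIONS.map (fun d =>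
        (d, f (m, s, d))))))))))

theorem pv_init_eq :
    (pvMANEUVERS.foldl (fun mx m =>
      let mx := mx.insert m PySem.Dict.empty
      pvSTANCES.foldl (fun mx s =>
        let mx := mx.modify m PySem.Dict.empty (fun sm => sm.insert s PySem.Dict.empty)
        pvDIRECTIONS.foldl (fun mx d =>
          mx.modify m PySem.Dict.empty (fun sm =>
            sm.modify s PySem.Dict.empty (fun dm => dm.insert d []))) mx) mx)
      (PySem.Dict.empty : PySem.Dict String (PySem.Dict String (PySem.Dict String (List (List (String × String)))))))
    = pvM (fun _ => []) := by
  decide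

theorem pv_step_gen (f : String × String × String → List (List (String × String)))
    (m s d : String) (clip : List (String × String)) :
    (if (pvM f).contains m && ((pvM f).getD m PySem.Dict.empty).contains s &&
        (((pvM f).getD m PySem.Dict.empty).getD s PySem.Dict.empty).contains d then
       (pvM f).modify m PySem.Dict.empty (fun sm =>
         sm.modify s PySem.Dict.empty (fun dm => dm.modify d [] (· ++ [clip])))
     else pvM f)
    = pvM (fun k => if k = (m, s, d) then f k ++ [clip] else f k) := by
  by_cases hm : m ∈ pvMANEUVERS
  · simp only [pvMANEUVERS, List.mem_cons, List.not_mem_nil, or_false] at hm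
    by_cases hs : s ∈ pvSTANCES
    · simp only [pvSTANCES, List.mem_cons, List.not_mem_nil, or_false] at hs
      by_cases hd : d ∈ pvDIRECTIONS
      · simp only [pvDIRECTIONS, List.mem_cons, List.not_mem_nil, or_false] at hd
        rcases hm with rfl | rfl | rfl <;> rcases hs with rfl | rfl <;> rcases hd with rfl | rfl <;>
        · simp only [pvM, pvMANEUVERS, pvSTANCES, pvDIRECTIONS, List.map]
          simp [PySem.Dict.modify, PySem.Dict.contains, PySem.Dict.getD, PySem.Dict.get?,
                PySem.Dict.insert, Prod.ext_iff]
      · simp only [pvDIRECTIONS, List.mem_cons, List.not_mem_nil, or_false] at hd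
        push Not at hd
        obtain ⟨hd1, hd2⟩ := hd
        rcases hm with rfl | rfl | rfl <;> rcases hs with rfl | rfl <;>
        · simp only [pvM, pvMANEUVERS, pvSTANCES, pvDIRECTIONS, List.map]
          simp [PySem.Dict.contains, PySem.Dict.getD, PySem.Dict.get?,
                Prod.ext_iff, Ne.symm hd1, Ne.symm hd2]
    · simp only [pvSTANCES, List.mem_cons, List.not_mem_nil, or_false] at hs
      push Not at hs
      obtain ⟨hs1, hs2⟩ := hs
      rcases hm with rfl | rfl | rfl <;>
      · simp only [pvM, pvMANEUVERS, pvSTANCES, pvDIRECTIONS, List.map]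
        simp [PySem.Dict.contains, PySem.Dict.getD, PySem.Dict.get?,
              Prod.ext_iff, Ne.symm hs1, Ne.symm hs2]
  · simp only [pvMANEUVERS, List.mem_cons, List.not_mem_nil, or_false] at hm
    push Not at hm
    obtain ⟨hm1, hm2, hm3⟩ := hm
    simp only [pvM, pvMANEUVERS, pvSTANCES, pvDIRECTIONS, List.map]
    simp [PySem.Dict.contains, PySem.Dict.getD, PySem.Dict.get?,
          Prod.ext_iff, Ne.symm hm1, Ne.symm hm2, Ne.symm hm3]

theorem pv_loop_eq (clips : List (List (String × String)))
    (f : String × String × String → List (List (String × String))) :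
    clips.foldl (fun mx clip =>
      let m := (PySem.Dict.mk clip).getD "maneuver" ""
      let s := (PySem.Dict.mk clip).getD "stance" ""
      let d := (PySem.Dict.mk clip).getD "direction" ""
      if mx.contains m && (mx.getD m PySem.Dict.empty).contains s &&
         ((mx.getD m PySem.Dict.empty).getD s PySem.Dict.empty).contains d then
        mx.modify m PySem.Dict.empty (fun sm =>
          sm.modify s PySem.Dict.empty (fun dm => dm.modify d [] (· ++ [clip])))
      else mx) (pvM f)
    = pvM (fun k => f k ++ clips.filter (fun c => pvKey c == k)) := by
  induction clips generalizing f with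
  | nil => simp [pvM]
  | cons c rest ih =>
    simp only [List.foldl_cons]
    rw [pv_step_gen f ((PySem.Dict.mk c).getD "maneuver" "")
          ((PySem.Dict.mk c).getD "stance" "") ((PySem.Dict.mk c).getD "direction" "") c]
    rw [ih]
    congr 1
    funext k
    by_cases h : pvKey c = k
    · subst h
      simp [pvKey]
    · have h' : k ≠ pvKey c := fun e => h e.symm
      simp only [List.filter_cons]
      rw [show (pvKey c == k) = false from beq_eq_false_iff_ne.mpr h]
      simp only [pvKey] at h'
      simp only [Bool.false_eq_true, if_false, if_neg h']

theorem pv_beq3 (a b c m s d : String) :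
    ((a, b, c) == (m, s, d)) = (a == m && b == s && c == d) := by
  show (a == m && (b == s && c == d)) = _
  rw [Bool.and_assoc]

-- ===== VERDICT (by name: the statement is the Claim_ definition above) =====
theorem build_coverage_matrix_spec : Claim_equal_build_coverage_matrix := by
  intro clips _
  show build_coverage_matrix clips = build_coverage_matrix_alt clips
  unfold build_coverage_matrix build_coverage_matrix_alt
  rw [pv_init_eq, pv_loop_eq]
  simp only [pvM, pvMANEUVERS, pvSTANCES, pvDIRECTIONS, List.map, List.nil_append, pvKey]
  simp only [pv_beq3]
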